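-- pv_equiv track=rewrite | github.com/pasha-danilevich/fastapi_faststream_apscheduler_logger | logger/utils.py | subtract_sets
-- ===== SOURCE A (Python) =====
-- def subtract_sets(set1: set[str], set2: set[str]) -> set[str]:
--     result = set()
--     # Удаляем дочерние элементы и элементы из set2
--     for item in set1:
--         is_child = False
--         for parent in set2:
--             if item.startswith(parent + '.'):
--                 is_child = True
--                 break
--         if not is_child and item not in set2:
--             result.add(item)
--
--     # Удаляем родительские элементы, если их дочерние элементы есть в set2
--     to_remove = set()  # Множество для хранения элементов, которые нужно удалить
--     for item in set2:
--         if '.' in item: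
--             item_list = item.split('.')
--             item_list.pop()
--             for _ in range(len(item_list)):
--                 parent = '.'.join(item_list)
--                 if parent in result:
--                     to_remove.add(parent)
--                     try:
--                         item_list.pop()
--                     except IndexError:
--                         pass
--
--     result -= to_remove
--     return result
-- ===== SOURCE B (Python) =====
-- def subtract_sets(set1: set[str], set2: set[str]) -> set[str]:
--     def ancestors(item: str) -> list[str]:
--         parts = item.split('.')
--         return ['.'.join(parts[:k]) for k in range(1, len(parts))]
--
--     result = set()
--     for item in set1:
--         if item not in set2 and not any(a in set2 for a in ancestors(item)):
--             result.add(item)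
--     removed = set()
--     for item in set2:
--         for a in reversed(ancestors(item)):
--             if a in result:
--                 removed.add(a)
--             else:
--                 break
--     return result - removed
-- ===== Notes on version B (the rewrite author's own statement) =====
-- stated objective: faster
-- what changed: B's first pass checks each item's dotted-ancestor prefixes against set2 by hash lookup instead of scanning all of set2 with startswith, and its second pass walks each set2 item's precomputed ancestor list longest-first with a break instead of A's split/pop/join index loop.
import Mathlib
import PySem

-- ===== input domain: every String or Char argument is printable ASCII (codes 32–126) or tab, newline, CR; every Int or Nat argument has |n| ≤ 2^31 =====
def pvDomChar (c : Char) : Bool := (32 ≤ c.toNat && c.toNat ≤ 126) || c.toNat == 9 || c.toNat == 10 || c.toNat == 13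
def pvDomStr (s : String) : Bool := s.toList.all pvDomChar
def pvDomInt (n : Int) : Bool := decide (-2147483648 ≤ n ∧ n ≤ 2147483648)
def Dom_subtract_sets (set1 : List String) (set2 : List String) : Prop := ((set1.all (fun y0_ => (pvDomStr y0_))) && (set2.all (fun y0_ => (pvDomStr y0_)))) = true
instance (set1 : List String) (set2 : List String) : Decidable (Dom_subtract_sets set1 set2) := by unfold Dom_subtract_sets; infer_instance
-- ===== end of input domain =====

-- B checks each item's dotted-ancestor prefixes against set2 by hash lookup instead of scanning
-- set2, and walks each set2 item's ancestor list longest-first with a break instead of A's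
-- split/pop/join index loop; outputs are Python sets, both ports build them in set1's list order.

-- ===== PORT A =====
def subtract_sets (set1 : List String) (set2 : List String) : List String :=
  -- result = set(); for item in set1: ...
  let result : PySem.Set String :=
    set1.foldl (fun result item =>
      -- is_child = False; for parent in set2: if item.startswith(parent + '.'): is_child = True; break
      let is_child := set2.any (fun parent => PySem.Str.startswith item (parent ++ "."))
      if !is_child && !(PySem.Set.contains set2 item) then PySem.Set.add result item else result)
      PySem.Set.empty
  -- to_remove = set(); for item in set2: ...
  let to_remove : PySem.Set String :=
    set2.foldl (fun to_remove item =>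
      if PySem.Str.isIn "." item then
        -- item_list = item.split('.')  (separator "." is non-empty: split? is never none)
        let item_list := (PySem.Str.split? item ".").getD []
        -- item_list.pop()  (value discarded; the list is non-empty since '.' is in item)
        let item_list := match PySem.List.pop? item_list with
          | some pr => pr.2
          | none => item_list
        -- for _ in range(len(item_list)): ...
        ((PySem.List.pyRange 0 (item_list.length : Int) 1).foldl (fun st _ =>
          let parent := PySem.Str.join "." st.1
          if PySem.Set.contains result parent then
            (match PySem.List.pop? st.1 with     -- try: item_list.pop(); except IndexError: pass
             | some pr => pr.2
             | none => st.1,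
             PySem.Set.add st.2 parent)
          else st) (item_list, to_remove)).2
      else to_remove)
      PySem.Set.empty
  -- result -= to_remove; return result
  PySem.Set.diff result to_remove

-- ===== PORT B =====
-- ancestors(item) = ['.'.join(parts[:k]) for k in range(1, len(parts))]
def pyAncestors (item : String) : List String :=
  let parts := (PySem.Str.split? item ".").getD []   -- "." is non-empty: split? is never none
  (PySem.List.pyRange 1 (parts.length : Int) 1).map (fun k => PySem.Str.join "." (parts.take k.toNat))

-- for a in reversed(ancestors(item)): if a in result: removed.add(a) else: break
def subWalk (result : PySem.Set String) : List String → PySem.Set String → PySem.Set String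
  | [], removed => removed
  | a :: rest, removed =>
    if PySem.Set.contains result a then subWalk result rest (PySem.Set.add removed a)
    else removed

def subtract_sets_alt (set1 : List String) (set2 : List String) : List String :=
  let result : PySem.Set String :=
    set1.foldl (fun result item =>
      if !(PySem.Set.contains set2 item) && !((pyAncestors item).any (fun a => PySem.Set.contains set2 a))
      then PySem.Set.add result item else result) PySem.Set.empty
  let removed : PySem.Set String :=
    set2.foldl (fun removed item => subWalk result (pyAncestors item).reverse removed)
      PySem.Set.empty
  PySem.Set.diff result removed

-- ===== PRECONDITION & SPEC =====
def Spec_subtract_sets (set1 : List String) (set2 : List String) (out : List String) : Prop := out = subtract_sets_alt set1 set2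
instance (set1 : List String) (set2 : List String) (out : List String) : Decidable (Spec_subtract_sets set1 set2 out) := by unfold Spec_subtract_sets; infer_instance

-- ===== CLAIM (what is proved, stated in full; the proofs are below) =====
def Claim_equal_subtract_sets : Prop := ∀ (set1 : List String) (set2 : List String), Dom_subtract_sets set1 set2 → Spec_subtract_sets set1 set2 (subtract_sets set1 set2)

-- ===== LEMMAS AND PROOFS =====

def splitD : List Char → List (List Char)
  | [] => [[]]
  | c :: rest =>
    if c = '.' then [] :: splitD rest
    else match splitD rest with
      | [] => [[c]]
      | h :: t => (c :: h) :: t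

def joinD : List (List Char) → List Char
  | [] => []
  | [a] => a
  | a :: b :: t => a ++ '.' :: joinD (b :: t)

def consHd (p : List Char) : List (List Char) → List (List Char)
  | [] => [p]
  | h :: t => (p ++ h) :: t

theorem splitD_ne_nil (cs : List Char) : splitD cs ≠ [] := by
  cases cs with
  | nil => simp [splitD]
  | cons c rest =>
    simp only [splitD]
    split
    · simp
    · split <;> simp

theorem go_eq (fuel : Nat) : ∀ (l cur : List Char) (acc : List (List Char)), l.length < fuel →
    PySem.Chars.splitOn.go ['.'] fuel l cur acc = acc.reverse ++ consHd cur.reverse (splitD l) := by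
  induction fuel with
  | zero => intro l cur acc h; omega
  | succ n ih =>
    intro l cur acc h
    cases l with
    | nil => rw [PySem.Chars.splitOn.go.eq_def]; simp [splitD, consHd]
    | cons c rest =>
      rw [PySem.Chars.splitOn.go.eq_3]
      by_cases hc : c = '.'
      · subst hc
        rw [if_pos (by simp [List.isPrefixOf])]
        rw [ih _ _ _ (by simpa using Nat.lt_of_succ_lt_succ h)]
        rcases hsp : splitD rest with _ | ⟨h1, t1⟩
        · exact absurd hsp (splitD_ne_nil rest)
        · simp [splitD, consHd, hsp]
      · rw [if_neg (by simp [List.isPrefixOf]; exact fun hh => (hc hh.symm).elim)]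
        rw [ih _ _ _ (by simpa using Nat.lt_of_succ_lt_succ h)]
        simp only [splitD, if_neg hc]
        rcases hsp : splitD rest with _ | ⟨h1, t1⟩
        · exact absurd hsp (splitD_ne_nil rest)
        · simp [consHd]

theorem splitOn_eq_splitD (cs : List Char) : PySem.Chars.splitOn cs ['.'] = splitD cs := by
  unfold PySem.Chars.splitOn
  rw [go_eq _ _ _ _ (by omega)]
  rcases hsp : splitD cs with _ | ⟨h1, t1⟩
  · exact absurd hsp (splitD_ne_nil cs)
  · simp [consHd]

theorem join_eq_joinD (ps : List (List Char)) : PySem.Chars.join ['.'] ps = joinD ps := by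
  unfold PySem.Chars.join
  induction ps with
  | nil => simp [joinD, List.intercalate]
  | cons a t ih =>
    cases t with
    | nil => simp [joinD, List.intercalate]
    | cons b t2 =>
      simp only [List.intercalate] at ih ⊢
      simp [List.intersperse, joinD, ← ih]

theorem joinD_cons_cons (c : Char) (h : List Char) (ts : List (List Char)) :
    joinD ((c :: h) :: ts) = c :: joinD (h :: ts) := by
  cases ts <;> simp [joinD]

theorem dot_prefix_iff (cs : List Char) : ∀ (p : List Char),
    p ++ ['.'] <+: cs ↔ ∃ k, 1 ≤ k ∧ k < (splitD cs).length ∧ joinD ((splitD cs).take k) = p := by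
  induction cs with
  | nil =>
    intro p
    constructor
    · rintro ⟨t, ht⟩; simp at ht
    · rintro ⟨k, hk1, hk2, -⟩; simp [splitD] at hk2; omega
  | cons c rest ih =>
    intro p
    by_cases hc : c = '.'
    · subst hc
      rcases hq : splitD rest with _ | ⟨q1, qt⟩
      · exact absurd hq (splitD_ne_nil rest)
      constructor
      · intro hpre
        cases p with
        | nil =>
          exact ⟨1, le_refl _, by simp [splitD, hq], by simp [splitD, hq, joinD]⟩
        | cons d p' =>
          rw [List.cons_append, List.cons_prefix_cons] at hpre
          obtain ⟨hd, hpre⟩ := hpre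
          obtain ⟨k, hk1, hk2, hj⟩ := (ih p').1 hpre
          refine ⟨k + 1, by omega, by simp [splitD, hq] at hk2 ⊢; omega, ?_⟩
          rw [hq] at hj
          have htk : (splitD ('.' :: rest)).take (k + 1) = [] :: ((q1 :: qt).take k) := by
            simp [splitD, hq]
          rw [htk]
          rcases hk : (q1 :: qt).take k with _ | ⟨a, b⟩
          · simp at hk; omega
          · rw [show joinD ([] :: a :: b) = '.' :: joinD (a :: b) from by simp [joinD],
               ← hk, hj, hd]
      · rintro ⟨k, hk1, hk2, hj⟩
        rcases Nat.exists_eq_add_of_le hk1 with ⟨k', rfl⟩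
        cases k' with
        | zero =>
          simp [splitD, hq, joinD] at hj
          subst hj
          exact ⟨rest, rfl⟩
        | succ k'' =>
          have htk : (splitD ('.' :: rest)).take (1 + (k'' + 1)) = [] :: ((q1 :: qt).take (k'' + 1)) := by
            rw [show splitD ('.' :: rest) = [] :: q1 :: qt from by simp [splitD, hq],
               show 1 + (k'' + 1) = (k'' + 1) + 1 from by omega, List.take_succ_cons]
          rw [htk] at hj
          rcases hk : (q1 :: qt).take (k'' + 1) with _ | ⟨a, b⟩
          · simp at hk
          · rw [hk] at hj
            have : joinD ([] :: a :: b) = '.' :: joinD (a :: b) := by simp [joinD]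
            rw [this] at hj
            subst hj
            rw [List.cons_append, List.cons_prefix_cons]
            refine ⟨rfl, ?_⟩
            apply (ih _).2
            refine ⟨k'' + 1, by omega, ?_, by rw [hq, hk]⟩
            rw [hq]
            simp [splitD, hq] at hk2
            simp only [List.length_cons]
            omega
    · rcases hq : splitD rest with _ | ⟨q1, qt⟩
      · exact absurd hq (splitD_ne_nil rest)
      have hsc : splitD (c :: rest) = (c :: q1) :: qt := by simp [splitD, hc, hq]
      constructor
      · intro hpre
        cases p with
        | nil =>
          obtain ⟨t, ht⟩ := hpre
          simp at ht
          exact absurd ht.1.symm hc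
        | cons d p' =>
          rw [List.cons_append, List.cons_prefix_cons] at hpre
          obtain ⟨hd, hpre⟩ := hpre
          obtain ⟨k, hk1, hk2, hj⟩ := (ih p').1 hpre
          refine ⟨k, hk1, by rw [hsc]; rw [hq] at hk2; simpa using hk2, ?_⟩
          rw [hq] at hj
          rcases Nat.exists_eq_add_of_le hk1 with ⟨k', rfl⟩
          rw [hsc]
          have h1 : ((c :: q1) :: qt).take (1 + k') = (c :: q1) :: qt.take k' := by
            rw [Nat.add_comm, List.take_succ_cons]
          have h2 : (q1 :: qt).take (1 + k') = q1 :: qt.take k' := by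
            rw [Nat.add_comm, List.take_succ_cons]
          rw [h1, joinD_cons_cons]
          rw [h2] at hj
          rw [hj, hd]
      · rintro ⟨k, hk1, hk2, hj⟩
        rcases Nat.exists_eq_add_of_le hk1 with ⟨k', rfl⟩
        rw [hsc] at hj hk2
        have htk : ((c :: q1) :: qt).take (1 + k') = (c :: q1) :: qt.take k' := by
          rw [Nat.add_comm, List.take_succ_cons]
        rw [htk, joinD_cons_cons] at hj
        subst hj
        rw [List.cons_append, List.cons_prefix_cons]
        refine ⟨rfl, (ih _).2 ⟨1 + k', by omega, ?_, ?_⟩⟩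
        · rw [hq]; simpa using hk2
        · rw [hq]
          rw [Nat.add_comm, List.take_succ_cons]

-- ---- string bridges ----

def pvParts (s : String) : List String := (splitD s.toList).map String.ofList
def pvJ (s : String) (k : Nat) : List Char := joinD ((splitD s.toList).take k)

theorem parts_eq (s : String) : (PySem.Str.split? s ".").getD [] = pvParts s := by
  simp [PySem.Str.split?, PySem.Chars.split?, pvParts]
  rw [splitOn_eq_splitD]

theorem J_toList (s : String) (k : Nat) :
    (PySem.Str.join "." ((pvParts s).take k)).toList = pvJ s k := by
  simp [PySem.Str.join, pvParts, pvJ, ← List.map_take]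
  rw [join_eq_joinD]
  congr 1
  simp [Function.comp_def]

theorem pyRange1 (n : Nat) :
    PySem.List.pyRange 1 (n : Int) 1 = (List.range (n - 1)).map (fun j : Nat => 1 + (j : Int)) := by
  unfold PySem.List.pyRange
  rw [if_neg (by norm_num)]
  by_cases h : (1 : Int) < n
  · rw [if_pos (by norm_num), if_pos h]
    have h1 : ((n : Int) - 1 + 1 - 1) / 1 = (n : Int) - 1 := by omega
    rw [h1]
    have h2 : ((n : Int) - 1).toNat = n - 1 := by omega
    rw [h2]
    apply List.map_congr_left
    intro j hj
    ring
  · rw [if_pos (by norm_num), if_neg h]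
    have h1 : n - 1 = 0 := by omega
    rw [h1]
    simp

theorem pyRange0_len (m : Nat) : (PySem.List.pyRange 0 (m : Int) 1).length = m := by
  unfold PySem.List.pyRange
  rw [if_neg (by norm_num)]
  by_cases h : (0 : Int) < m
  · rw [if_pos (by norm_num), if_pos h]
    simp only [List.length_map, List.length_range]
    omega
  · rw [if_pos (by norm_num), if_neg h]
    simp only [List.range_zero, List.map_nil, List.length_nil]
    omega

theorem pvParts_len (s : String) : (pvParts s).length = (splitD s.toList).length := by
  simp [pvParts]

theorem pyAncestors_eq (s : String) :
    pyAncestors s = (List.range ((splitD s.toList).length - 1)).map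
      (fun j => PySem.Str.join "." ((pvParts s).take (1 + j))) := by
  simp only [pyAncestors, parts_eq, pvParts_len, pyRange1, List.map_map]
  apply List.map_congr_left
  intro j hj
  simp only [Function.comp_apply]
  congr 1

theorem mem_pyAncestors (s a : String) :
    a ∈ pyAncestors s ↔ ∃ k, 1 ≤ k ∧ k < (splitD s.toList).length ∧ a.toList = pvJ s k := by
  have hne := splitD_ne_nil s.toList
  have hlen : 1 ≤ (splitD s.toList).length := List.length_pos_of_ne_nil hne
  rw [pyAncestors_eq]
  simp only [List.mem_map, List.mem_range]
  constructor
  · rintro ⟨j, hj, rfl⟩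
    exact ⟨1 + j, by omega, by omega, J_toList s (1 + j)⟩
  · rintro ⟨k, hk1, hk2, hk3⟩
    refine ⟨k - 1, by omega, ?_⟩
    have hk : 1 + (k - 1) = k := by omega
    rw [hk]
    apply String.toList_inj.mp
    rw [J_toList, hk3]

theorem mem_pyAncestors_dotted (s a : String) :
    a ∈ pyAncestors s ↔ a.toList ++ ['.'] <+: s.toList := by
  rw [mem_pyAncestors, dot_prefix_iff]
  constructor
  · rintro ⟨k, h1, h2, h3⟩; exact ⟨k, h1, h2, h3.symm⟩
  · rintro ⟨k, h1, h2, h3⟩; exact ⟨k, h1, h2, h3.symm⟩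

-- ---- generic fold lemma ----

theorem foldl_const_iterate {α β : Type} (l : List β) (g : α → α) (st : α) :
    l.foldl (fun st _ => g st) st = g^[l.length] st := by
  induction l generalizing st with
  | nil => rfl
  | cons b t ih => simp [List.foldl_cons, ih, Function.iterate_succ_apply]

-- ---- the two first passes coincide ----

def predA (set2 : List String) (item : String) : Bool :=
  !(set2.any fun parent => PySem.Str.startswith item (parent ++ ".")) && !(PySem.Set.contains set2 item)

def predB (set2 : List String) (item : String) : Bool :=
  !(PySem.Set.contains set2 item) && !((pyAncestors item).any fun a => PySem.Set.contains set2 a)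

def pvR (set1 set2 : List String) : PySem.Set String :=
  set1.foldl (fun result item => if predB set2 item then PySem.Set.add result item else result)
    PySem.Set.empty

theorem anyA_iff (set2 : List String) (item : String) :
    (set2.any fun parent => PySem.Str.startswith item (parent ++ ".")) = true ↔
      ∃ p ∈ set2, p.toList ++ ['.'] <+: item.toList := by
  rw [List.any_eq_true]
  constructor
  · rintro ⟨p, hp, hs⟩
    refine ⟨p, hp, ?_⟩
    rw [PySem.Str.startswith_eq] at hs
    rw [PySem.Chars.startswith_iff] at hs
    simpa using hs
  · rintro ⟨p, hp, hs⟩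
    refine ⟨p, hp, ?_⟩
    rw [PySem.Str.startswith_eq, PySem.Chars.startswith_iff]
    simpa using hs

theorem anyB_iff (set2 : List String) (item : String) :
    ((pyAncestors item).any fun a => PySem.Set.contains set2 a) = true ↔
      ∃ p ∈ set2, p.toList ++ ['.'] <+: item.toList := by
  rw [List.any_eq_true]
  constructor
  · rintro ⟨a, ha, hc⟩
    refine ⟨a, ?_, (mem_pyAncestors_dotted item a).1 ha⟩
    rw [PySem.Set.contains_iff] at hc
    exact hc
  · rintro ⟨p, hp, hs⟩
    exact ⟨p, (mem_pyAncestors_dotted item p).2 hs, (PySem.Set.contains_iff _ _).2 hp⟩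

theorem pred_eq (set2 : List String) (item : String) : predA set2 item = predB set2 item := by
  unfold predA predB
  rw [Bool.and_comm]
  congr 1
  rw [← Bool.not_inj_iff]
  simp only [Bool.not_not]
  rw [Bool.eq_iff_iff, anyA_iff, anyB_iff]

-- ---- chain characterisation of A's second pass ----

def chainStep (R : List String) (st : List String × PySem.Set String) :
    List String × PySem.Set String :=
  let parent := PySem.Str.join "." st.1
  if PySem.Set.contains R parent then
    (match PySem.List.pop? st.1 with
     | some pr => pr.2
     | none => st.1,
     PySem.Set.add st.2 parent)
  else st

def chainAcc (R : List String) (P : List String) : Nat → PySem.Set String → PySem.Set String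
  | 0, acc => acc
  | m + 1, acc =>
    if PySem.Set.contains R (PySem.Str.join "." (P.take (m + 1))) then
      chainAcc R P m (PySem.Set.add acc (PySem.Str.join "." (P.take (m + 1))))
    else acc

theorem iterate_chainStep (R P : List String) :
    ∀ (m : Nat) (acc : PySem.Set String), m ≤ P.length →
      ∃ ls, (chainStep R)^[m] (P.take m, acc) = (ls, chainAcc R P m acc) := by
  intro m
  induction m with
  | zero => intro acc _; exact ⟨P.take 0, rfl⟩
  | succ m ih =>
    intro acc hm
    rw [Function.iterate_succ_apply]
    have hget : P[m]? = some (P[m]'(by omega)) := List.getElem?_eq_getElem (by omega)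
    have htake : P.take (m + 1) = P.take m ++ [P[m]'(by omega)] := by
      rw [List.take_add_one, hget]; rfl
    have hpop : PySem.List.pop? (P.take (m + 1)) = some (P[m]'(by omega), P.take m) := by
      rw [htake]; exact PySem.List.pop?_last _ _
    by_cases hc : PySem.Set.contains R (PySem.Str.join "." (P.take (m + 1))) = true
    · have hgstep : chainStep R (P.take (m + 1), acc)
          = (P.take m, PySem.Set.add acc (PySem.Str.join "." (P.take (m + 1)))) := by
        unfold chainStep
        rw [if_pos hc, hpop]
      rw [hgstep]
      obtain ⟨ls, hls⟩ := ih (PySem.Set.add acc (PySem.Str.join "." (P.take (m + 1)))) (by omega)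
      refine ⟨ls, ?_⟩
      rw [hls]
      have : chainAcc R P (m + 1) acc
          = chainAcc R P m (PySem.Set.add acc (PySem.Str.join "." (P.take (m + 1)))) := by
        simp only [chainAcc]
        rw [if_pos hc]
      rw [this]
    · have hgstep : chainStep R (P.take (m + 1), acc) = (P.take (m + 1), acc) := by
        unfold chainStep
        rw [if_neg hc]
      rw [hgstep, Function.iterate_fixed hgstep]
      refine ⟨P.take (m + 1), ?_⟩
      have : chainAcc R P (m + 1) acc = acc := by
        simp only [chainAcc]
        rw [if_neg hc]
      rw [this]

theorem mem_chainAcc (R P : List String) :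
    ∀ (m : Nat) (acc : PySem.Set String) (x : String),
      x ∈ chainAcc R P m acc ↔ x ∈ acc ∨
        ∃ k, 1 ≤ k ∧ k ≤ m ∧ x = PySem.Str.join "." (P.take k) ∧
          ∀ j, k ≤ j → j ≤ m → PySem.Set.contains R (PySem.Str.join "." (P.take j)) = true := by
  intro m
  induction m with
  | zero =>
    intro acc x
    simp only [chainAcc]
    constructor
    · intro h; exact Or.inl h
    · rintro (h | ⟨k, hk1, hk2, -⟩)
      · exact h
      · omega
  | succ m ih =>
    intro acc x
    simp only [chainAcc]
    by_cases hc : PySem.Set.contains R (PySem.Str.join "." (P.take (m + 1))) = true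
    · rw [if_pos hc, ih]
      simp only [PySem.Set.mem_add]
      constructor
      · rintro (⟨hx | rfl⟩ | ⟨k, hk1, hk2, hkx, hall⟩)
        · exact Or.inl hx
        · refine Or.inr ⟨m + 1, by omega, le_refl _, rfl, ?_⟩
          intro j hj1 hj2
          have : j = m + 1 := by omega
          rw [this]; exact hc
        · refine Or.inr ⟨k, hk1, by omega, hkx, ?_⟩
          intro j hj1 hj2
          rcases Nat.lt_or_ge j (m + 1) with h | h
          · exact hall j hj1 (by omega)
          · have : j = m + 1 := by omega
            rw [this]; exact hc
      · rintro (hx | ⟨k, hk1, hk2, hkx, hall⟩)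
        · exact Or.inl (Or.inl hx)
        · rcases Nat.lt_or_ge k (m + 1) with h | h
          · exact Or.inr ⟨k, hk1, by omega, hkx, fun j hj1 hj2 => hall j hj1 (by omega)⟩
          · have : k = m + 1 := by omega
            subst this
            exact Or.inl (Or.inr hkx)
    · rw [if_neg hc]
      constructor
      · intro h; exact Or.inl h
      · rintro (h | ⟨k, hk1, hk2, hkx, hall⟩)
        · exact h
        · exact absurd (hall (m + 1) (by omega) (le_refl _)) hc

-- x belongs to the removal chain of s: x is the prefix at cut k and every longer cut is kept
def chainCond (R : List String) (s x : String) : Prop :=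
  ∃ k, 1 ≤ k ∧ k ≤ (pvParts s).length - 1 ∧ x = PySem.Str.join "." ((pvParts s).take k) ∧
    ∀ j, k ≤ j → j ≤ (pvParts s).length - 1 →
      PySem.Set.contains R (PySem.Str.join "." ((pvParts s).take j)) = true

def pvStep (R : List String) (to_remove : PySem.Set String) (item : String) : PySem.Set String :=
  if PySem.Str.isIn "." item then
    let item_list := (PySem.Str.split? item ".").getD []
    let item_list := match PySem.List.pop? item_list with
      | some pr => pr.2
      | none => item_list
    ((PySem.List.pyRange 0 (item_list.length : Int) 1).foldl (fun st _ =>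
      let parent := PySem.Str.join "." st.1
      if PySem.Set.contains R parent then
        (match PySem.List.pop? st.1 with
         | some pr => pr.2
         | none => st.1,
         PySem.Set.add st.2 parent)
      else st) (item_list, to_remove)).2
  else to_remove

def pvToRemove (set1 set2 : List String) : PySem.Set String :=
  set2.foldl (pvStep (pvR set1 set2)) PySem.Set.empty

theorem pvStep_mem (R : List String) (item : String) (acc : PySem.Set String) (x : String) :
    x ∈ pvStep R acc item ↔
      x ∈ acc ∨ (PySem.Str.isIn "." item = true ∧ chainCond R item x) := by
  unfold pvStep
  by_cases hdot : PySem.Str.isIn "." item = true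
  · rw [if_pos hdot, parts_eq]
    have hPne : pvParts item ≠ [] := by
      unfold pvParts
      simp [splitD_ne_nil]
    have hdl : pvParts item = (pvParts item).dropLast ++ [(pvParts item).getLast hPne] :=
      (List.dropLast_append_getLast hPne).symm
    have hpop : PySem.List.pop? (pvParts item)
        = some ((pvParts item).getLast hPne, (pvParts item).dropLast) := by
      conv_lhs => rw [hdl]
      exact PySem.List.pop?_last _ _
    simp only [hpop]
    have hfun : (fun (st : List String × PySem.Set String) (_ : Int) =>
        let parent := PySem.Str.join "." st.1
        if PySem.Set.contains R parent then
          (match PySem.List.pop? st.1 with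
           | some pr => pr.2
           | none => st.1,
           PySem.Set.add st.2 parent)
        else st) = (fun st _ => chainStep R st) := rfl
    rw [hfun, foldl_const_iterate, pyRange0_len]
    have hm : (pvParts item).dropLast = (pvParts item).take ((pvParts item).length - 1) := by
      rw [List.dropLast_eq_take]
    have hlen : (pvParts item).dropLast.length = (pvParts item).length - 1 :=
      List.length_dropLast
    rw [hlen, hm]
    obtain ⟨ls, hiter⟩ := iterate_chainStep R (pvParts item) ((pvParts item).length - 1) acc
      (by omega)
    rw [hiter]
    rw [mem_chainAcc]
    unfold chainCond
    constructor
    · rintro (h | h)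
      · exact Or.inl h
      · exact Or.inr ⟨hdot, h⟩
    · rintro (h | ⟨-, h⟩)
      · exact Or.inl h
      · exact Or.inr h
  · rw [if_neg hdot]
    constructor
    · intro h; exact Or.inl h
    · rintro (h | ⟨hd, -⟩)
      · exact h
      · exact absurd hd hdot

theorem mem_foldl_pvStep (R : List String) (l : List String) :
    ∀ (acc : PySem.Set String) (x : String),
      x ∈ l.foldl (pvStep R) acc ↔
        x ∈ acc ∨ ∃ s ∈ l, PySem.Str.isIn "." s = true ∧ chainCond R s x := by
  induction l with
  | nil => intro acc x; simp
  | cons s t ih =>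
    intro acc x
    simp only [List.foldl_cons]
    rw [ih]
    simp only [pvStep_mem, List.mem_cons]
    constructor
    · rintro (⟨h | ⟨h1, h2⟩⟩ | ⟨s', hs', h⟩)
      · exact Or.inl h
      · exact Or.inr ⟨s, Or.inl rfl, h1, h2⟩
      · exact Or.inr ⟨s', Or.inr hs', h⟩
    · rintro (h | ⟨s', (rfl | hs'), h⟩)
      · exact Or.inl (Or.inl h)
      · exact Or.inl (Or.inr h)
      · exact Or.inr ⟨s', hs', h⟩

theorem mem_toRemove (set1 set2 : List String) (x : String) :
    x ∈ pvToRemove set1 set2 ↔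
      ∃ s ∈ set2, PySem.Str.isIn "." s = true ∧ chainCond (pvR set1 set2) s x := by
  have hrw : pvToRemove set1 set2 = set2.foldl (pvStep (pvR set1 set2)) PySem.Set.empty := rfl
  rw [hrw, mem_foldl_pvStep]
  simp [PySem.Set.empty]

theorem portA_eq (set1 set2 : List String) :
    subtract_sets set1 set2
      = (pvR set1 set2).filter (fun x => !(pvToRemove set1 set2).contains x) := by
  have hfun : (fun (result : PySem.Set String) (item : String) =>
      let is_child := set2.any fun parent => PySem.Str.startswith item (parent ++ ".")
      if !is_child && !(PySem.Set.contains set2 item) then PySem.Set.add result item else result)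
      = (fun (result : PySem.Set String) (item : String) =>
          if predB set2 item then PySem.Set.add result item else result) := by
    funext r i
    show (if predA set2 i then PySem.Set.add r i else r) = _
    rw [pred_eq]
  unfold subtract_sets
  simp only [hfun]
  rfl

-- ---- chain characterisation of B's second pass ----

theorem subWalk_eq_chainAcc (R P : List String) :
    ∀ (m : Nat) (acc : PySem.Set String),
      subWalk R (((List.range m).map (fun j => PySem.Str.join "." (P.take (1 + j)))).reverse) acc
        = chainAcc R P m acc := by
  intro m
  induction m with
  | zero => intro acc; rfl
  | succ m ih =>
    intro acc
    rw [List.range_succ, List.map_append, List.reverse_append]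
    simp only [List.map_cons, List.map_nil, List.reverse_cons, List.reverse_nil,
      List.nil_append, List.cons_append, subWalk]
    have h1m : 1 + m = m + 1 := by omega
    rw [h1m]
    simp only [chainAcc]
    by_cases hc : PySem.Set.contains R (PySem.Str.join "." (P.take (m + 1))) = true
    · rw [if_pos hc, if_pos hc, ih]
    · rw [if_neg hc, if_neg hc]

theorem subWalk_anc_mem (set1 set2 : List String) (s : String) (acc : PySem.Set String)
    (x : String) :
    x ∈ subWalk (pvR set1 set2) (pyAncestors s).reverse acc ↔
      x ∈ acc ∨ chainCond (pvR set1 set2) s x := by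
  rw [pyAncestors_eq, ← pvParts_len, subWalk_eq_chainAcc, mem_chainAcc]
  unfold chainCond
  rfl

def pvRemovedB (set1 set2 : List String) : PySem.Set String :=
  set2.foldl (fun removed item => subWalk (pvR set1 set2) (pyAncestors item).reverse removed)
    PySem.Set.empty

theorem mem_removedB (set1 set2 : List String) (x : String) :
    x ∈ pvRemovedB set1 set2 ↔ ∃ s ∈ set2, chainCond (pvR set1 set2) s x := by
  unfold pvRemovedB
  have hgen : ∀ (l : List String) (acc : PySem.Set String),
      x ∈ l.foldl (fun removed item =>
          subWalk (pvR set1 set2) (pyAncestors item).reverse removed) acc ↔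
        x ∈ acc ∨ ∃ s ∈ l, chainCond (pvR set1 set2) s x := by
    intro l
    induction l with
    | nil => intro acc; simp
    | cons s t ih =>
      intro acc
      simp only [List.foldl_cons]
      rw [ih, subWalk_anc_mem]
      simp only [List.mem_cons]
      constructor
      · rintro (⟨h | h⟩ | ⟨s', hs', h⟩)
        · exact Or.inl h
        · exact Or.inr ⟨s, Or.inl rfl, h⟩
        · exact Or.inr ⟨s', Or.inr hs', h⟩
      · rintro (h | ⟨s', (rfl | hs'), h⟩)
        · exact Or.inl (Or.inl h)
        · exact Or.inl (Or.inr h)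
        · exact Or.inr ⟨s', hs', h⟩
  rw [hgen]
  simp [PySem.Set.empty]

theorem portB_eq (set1 set2 : List String) :
    subtract_sets_alt set1 set2
      = (pvR set1 set2).filter (fun x => !(pvRemovedB set1 set2).contains x) := by
  unfold subtract_sets_alt
  rfl

-- chainCond at s forces s to contain a '.'
theorem chain_to_anc (R : List String) (s x : String) (h : chainCond R s x) :
    x ∈ pyAncestors s := by
  obtain ⟨k, hk1, hk2, hkx, -⟩ := h
  have hn : 1 ≤ (splitD s.toList).length :=
    List.length_pos_of_ne_nil (splitD_ne_nil s.toList)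
  rw [pvParts_len] at hk2
  refine (mem_pyAncestors s x).2 ⟨k, hk1, by omega, ?_⟩
  rw [hkx, J_toList]

theorem anc_dot (s x : String) (h : x ∈ pyAncestors s) : PySem.Str.isIn "." s = true := by
  have hdp := (mem_pyAncestors_dotted s x).1 h
  rw [PySem.Str.isIn]
  rw [PySem.Chars.isIn_iff_infix]
  have h1 : (['.'] : List Char) <:+ x.toList ++ ['.'] := List.suffix_append _ _
  have h2 : (x.toList ++ ['.']) <:+: s.toList := hdp.isInfix
  exact List.IsInfix.trans h1.isInfix h2

-- ===== VERDICT (by name: the statement is the Claim_ definition above) =====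
theorem subtract_sets_spec : Claim_equal_subtract_sets := by
  intro set1 set2 _
  show subtract_sets set1 set2 = subtract_sets_alt set1 set2
  rw [portA_eq, portB_eq]
  apply List.filter_congr
  intro x hxR
  have hmain : (pvToRemove set1 set2).contains x = (pvRemovedB set1 set2).contains x := by
    rw [Bool.eq_iff_iff, PySem.Set.contains_iff, PySem.Set.contains_iff,
      mem_toRemove, mem_removedB]
    constructor
    · rintro ⟨s, hs, -, hch⟩
      exact ⟨s, hs, hch⟩
    · rintro ⟨s, hs, hch⟩
      exact ⟨s, hs, anc_dot s x (chain_to_anc _ s x hch), hch⟩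
  rw [hmain]
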